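-- pv_equiv track=rewrite | github.com/andressegeo/py-duck-db-api | db_api/db_parser.py | determine_type
-- ===== SOURCE A (Python) =====
-- def determine_type(col):
--     types_desc = {
--         u"number": [u"int", u"float"],
--         u"text": [u"varchar", u"text"],
--         u"timestamp": [u"date"]
--     }
--
--     def get_machine_type(col):
--         matching_type = None
--         for key in types_desc:
--             for db_type in types_desc[key]:
--                 if db_type in col.get(u'type'):
--                     matching_type = key
--                     break
--         return matching_type
--
--     return get_machine_type(col)
-- ===== SOURCE B (Python) =====
-- def determine_type(col):
--     t = col.get(u'type')
--     # decision chain in reverse priority order (A's last-key-wins loop makes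
--     # timestamp > text > number), with early returns instead of any loop/table
--     if u"date" in t:
--         return u"timestamp"
--     if u"varchar" in t or u"text" in t:
--         return u"text"
--     if u"int" in t or u"float" in t:
--         return u"number"
--     return None
-- ===== Notes on version B (the rewrite author's own statement) =====
-- stated objective: simpler
-- what changed: Replaces the nested loop over a category->substrings dict (last-key-wins accumulator) by a loop-free early-return decision chain checked in reverse priority order (date, then varchar/text, then int/float).
-- outside the precondition, e.g. on determine_type({'name': 'x'}): A raises TypeError, B raises TypeError
import Mathlib
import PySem

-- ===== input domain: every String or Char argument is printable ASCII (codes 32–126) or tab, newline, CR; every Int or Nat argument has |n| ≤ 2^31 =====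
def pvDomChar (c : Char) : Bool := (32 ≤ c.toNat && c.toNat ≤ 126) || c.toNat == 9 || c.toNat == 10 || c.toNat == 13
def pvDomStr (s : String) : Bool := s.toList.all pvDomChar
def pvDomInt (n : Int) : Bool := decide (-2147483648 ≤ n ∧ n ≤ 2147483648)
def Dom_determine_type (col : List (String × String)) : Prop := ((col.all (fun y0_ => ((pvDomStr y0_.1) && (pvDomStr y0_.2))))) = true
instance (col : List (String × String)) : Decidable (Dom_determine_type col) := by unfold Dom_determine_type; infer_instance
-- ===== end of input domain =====

-- B replaces A's nested dict loop by a loop-free early-return decision chain in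
-- reverse priority order; return value only, no side effects.
-- ===== PORT A =====
-- inner 'for db_type in types_desc[key]' with break: first matching db_type sets acc to key and stops
def dtInner (t : String) (key : String) : List String → Option String → Option String
  | [], acc => acc
  | d :: rest, acc => if PySem.Str.isIn d t then some key else dtInner t key rest acc

def determine_type (col : List (String × String)) : Option String :=
  match col.lookup "type" with
  | none => none  -- unreachable under Pre_ (Python raises TypeError here)
  | some t =>
    let typesDesc : List (String × List String) :=
      [("number", ["int", "float"]), ("text", ["varchar", "text"]), ("timestamp", ["date"])]
    typesDesc.foldl (fun acc kd => dtInner t kd.1 kd.2 acc) none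

-- ===== PORT B =====
def determine_type_alt (col : List (String × String)) : Option String :=
  match col.lookup "type" with
  | none => none  -- unreachable under Pre_ (Python raises TypeError here)
  | some t =>
    if PySem.Str.isIn "date" t then some "timestamp"
    else if PySem.Str.isIn "varchar" t || PySem.Str.isIn "text" t then some "text"
    else if PySem.Str.isIn "int" t || PySem.Str.isIn "float" t then some "number"
    else none

-- ===== PRECONDITION & SPEC =====
-- Pre_ excludes dicts without a 'type' key: there col.get returns None and both A and B raise TypeError.
def Pre_determine_type (col : List (String × String)) : Prop :=
  (col.lookup "type").isSome = true
instance (col : List (String × String)) : Decidable (Pre_determine_type col) := by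
  unfold Pre_determine_type; infer_instance
def pvWitness_determine_type : (List (String × String)) := [("type", "int")]

def Spec_determine_type (col : List (String × String)) (out : Option String) : Prop := out = determine_type_alt col
instance (col : List (String × String)) (out : Option String) : Decidable (Spec_determine_type col out) := by unfold Spec_determine_type; infer_instance

-- ===== CLAIM (what is proved, stated in full; the proofs are below) =====
def Claim_equal_determine_type : Prop := ∀ (col : List (String × String)), Dom_determine_type col → Pre_determine_type col → Spec_determine_type col (determine_type col)

-- ===== LEMMAS AND PROOFS =====

-- ===== VERDICT (by name: the statement is the Claim_ definition above) =====
theorem determine_type_spec : Claim_equal_determine_type := by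
  intro col _ _
  unfold Spec_determine_type determine_type determine_type_alt
  cases col.lookup "type" with
  | none => rfl
  | some t =>
    simp only [List.foldl, dtInner, Bool.or_eq_true]
    split_ifs <;> simp_all
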